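-- pv_equiv track=rewrite | github.com/paiml/depyler | examples/test_pathlib.py | path_name
-- ===== SOURCE A (Python) =====
-- def path_name(filepath: str) -> str:
--     """Get the filename from a path (like Path.name)."""
--     if len(filepath) == 0:
--         return ""
--     i: int = len(filepath) - 1
--     while i >= 0:
--         if filepath[i] == "/":
--             return filepath[i + 1:]
--         i = i - 1
--     return filepath
-- ===== SOURCE B (Python) =====
-- def path_name(filepath: str) -> str:
--     """Get the filename from a path (like Path.name)."""
--     return filepath.split("/")[-1]
-- ===== Notes on version B (the rewrite author's own statement) =====
-- stated objective: simpler
-- what changed: Replaces A's backward index-by-index character scan with a single forward split on the separator into the list of path components, returning the last component.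
import Mathlib
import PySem

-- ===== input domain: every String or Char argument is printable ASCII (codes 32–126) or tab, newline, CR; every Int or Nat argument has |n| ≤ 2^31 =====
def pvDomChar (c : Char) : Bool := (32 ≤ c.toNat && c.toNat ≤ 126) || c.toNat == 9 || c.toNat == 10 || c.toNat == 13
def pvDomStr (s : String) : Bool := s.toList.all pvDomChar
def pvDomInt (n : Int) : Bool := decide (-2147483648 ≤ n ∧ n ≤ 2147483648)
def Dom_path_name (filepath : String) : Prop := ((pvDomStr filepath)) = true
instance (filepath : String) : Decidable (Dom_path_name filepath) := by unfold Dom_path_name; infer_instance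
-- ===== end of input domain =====

-- B replaces A's backward character-by-character scan with a forward split('/') taking the last component (simpler).


-- ===== PORT A =====
-- the while-loop: index i counts down from len-1; each step tests filepath[i] == "/"
def pathLoop (cs : List Char) : Nat → List Char
  | 0 =>
      if (PySem.List.pyGet? cs ((0 : Nat) : Int)).getD ' ' = '/' then
        PySem.List.slice cs (some ((1 : Nat) : Int)) none
      else cs
  | i + 1 =>
      if (PySem.List.pyGet? cs ((i + 1 : Nat) : Int)).getD ' ' = '/' then
        PySem.List.slice cs (some ((i + 2 : Nat) : Int)) none
      else pathLoop cs i

def path_name (filepath : String) : String :=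
  if filepath.toList.length = 0 then ""
  else String.mk (pathLoop filepath.toList (filepath.toList.length - 1))

-- ===== PORT B =====
-- filepath.split("/")[-1]; split with the nonempty separator "/" is PySem.Chars.splitOn
def path_name_alt (filepath : String) : String :=
  match PySem.List.pyGet? (PySem.Chars.splitOn filepath.toList "/".toList) (-1) with
  | some p => String.mk p
  | none => ""  -- unreachable: split never returns an empty list

-- ===== PRECONDITION & SPEC =====
def Spec_path_name (filepath : String) (out : String) : Prop := out = path_name_alt filepath
instance (filepath : String) (out : String) : Decidable (Spec_path_name filepath out) := by unfold Spec_path_name; infer_instance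

-- ===== CLAIM (what is proved, stated in full; the proofs are below) =====
def Claim_equal_path_name : Prop := ∀ (filepath : String), Dom_path_name filepath → Spec_path_name filepath (path_name filepath)

-- ===== LEMMAS AND PROOFS =====
-- the common characterisation: the suffix of cs after its last '/'
def afterSlash : List Char → List Char
  | [] => []
  | c :: rest => if '/' ∈ rest then afterSlash rest else if c = '/' then rest else c :: rest

theorem afterSlash_no_slash (l : List Char) (h : '/' ∉ l) : afterSlash l = l := by
  induction l with
  | nil => rfl
  | cons c rest ih =>
      simp only [List.mem_cons, not_or] at h
      simp [afterSlash, h.2, Ne.symm h.1]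

theorem afterSlash_snoc (xs : List Char) (c : Char) :
    afterSlash (xs ++ [c]) = if c = '/' then [] else afterSlash xs ++ [c] := by
  induction xs with
  | nil => simp [afterSlash]
  | cons a xs ih =>
      by_cases hc : c = '/'
      · subst hc
        simp [afterSlash, ih]
      · by_cases hx : '/' ∈ xs
        · simp [afterSlash, hx, hc, ih, List.mem_append]
        · simp only [List.cons_append, afterSlash, List.mem_append, hx, false_or,
            List.mem_singleton, Ne.symm hc, if_false, hc]
          split_ifs <;> simp

theorem pathLoop_eq (cs : List Char) (i : Nat) (h : i < cs.length) :
    pathLoop cs i = afterSlash (cs.take (i + 1)) ++ cs.drop (i + 1) := by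
  induction i with
  | zero =>
      obtain ⟨c, rest, rfl⟩ := List.exists_cons_of_ne_nil (List.ne_nil_of_length_pos h)
      by_cases hc : c = '/'
      · simp [pathLoop, PySem.List.slice_from_one, afterSlash, hc]
      · simp [pathLoop, afterSlash, hc]
  | succ i ih =>
      have hi : i < cs.length := Nat.lt_of_succ_lt h
      have hget : cs[(i + 1 : Nat)]? = some cs[i + 1] := List.getElem?_eq_getElem h
      have hcast2 : ((i + 2 : Nat) : Int).toNat = i + 2 := by omega
      have hslice : PySem.List.slice cs (some ((i + 2 : Nat) : Int)) none = cs.drop (i + 2) := by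
        rw [PySem.List.slice_from cs (by positivity), hcast2]
      have htake : cs.take (i + 2) = cs.take (i + 1) ++ [cs[i + 1]] := by
        simp [List.take_add_one, hget]
      have hdrop : cs.drop (i + 1) = cs[i + 1] :: cs.drop (i + 2) := List.drop_eq_getElem_cons h
      simp only [pathLoop]
      rw [PySem.List.pyGet?_natCast, hget]
      by_cases hc : cs[i + 1] = '/'
      · rw [if_pos (show (some cs[i + 1]).getD ' ' = '/' by simp [hc]), hslice, htake,
          afterSlash_snoc]
        simp [hc]
      · rw [if_neg (show ¬ (some cs[i + 1]).getD ' ' = '/' by simp [hc]), ih hi, htake,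
          afterSlash_snoc, if_neg hc, hdrop]
        simp [List.append_assoc]

theorem path_name_eq (s : String) : path_name s = String.mk (afterSlash s.toList) := by
  unfold path_name
  by_cases h : s.toList.length = 0
  · rw [if_pos h]
    rw [List.length_eq_zero_iff.mp h]
    rfl
  · rw [if_neg h]
    have hlt : s.toList.length - 1 < s.toList.length := by omega
    rw [pathLoop_eq s.toList _ hlt]
    have : s.toList.length - 1 + 1 = s.toList.length := by omega
    rw [this, List.take_length, List.drop_length, List.append_nil]

theorem splitOn_go_getLast? (fuel : Nat) :
    ∀ (l cur : List Char) (acc : List (List Char)), l.length < fuel →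
    (PySem.Chars.splitOn.go ['/'] fuel l cur acc).getLast? =
      some (if '/' ∈ l then afterSlash l else cur.reverse ++ l) := by
  induction fuel with
  | zero => intro l cur acc h; omega
  | succ fuel ih =>
      intro l cur acc h
      cases l with
      | nil => simp [PySem.Chars.splitOn.go]
      | cons c rest =>
          rw [PySem.Chars.splitOn.go.eq_def]
          by_cases hc : c = '/'
          · subst hc
            have hpre : List.isPrefixOf ['/'] ('/' :: rest) = true := by
              simp [List.isPrefixOf]
            simp only [hpre, if_pos]
            rw [show List.drop (['/'] : List Char).length ('/' :: rest) = rest by simp]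
            rw [ih rest [] _ (by simpa using Nat.lt_of_succ_lt_succ h)]
            by_cases hr : '/' ∈ rest <;> simp [afterSlash, hr]
          · have hpre : List.isPrefixOf ['/'] (c :: rest) = false := by
              simp [List.isPrefixOf, Ne.symm hc]
            simp only [hpre, Bool.false_eq_true, if_false]
            rw [ih rest (c :: cur) _ (by simpa using Nat.lt_of_succ_lt_succ h)]
            by_cases hr : '/' ∈ rest
            · simp [afterSlash, hr, Ne.symm hc]
            · simp [hr, Ne.symm hc]

theorem splitOn_getLast? (cs : List Char) :
    (PySem.Chars.splitOn cs ['/']).getLast? = some (afterSlash cs) := by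
  unfold PySem.Chars.splitOn
  rw [splitOn_go_getLast? (cs.length + 1) cs [] [] (by omega)]
  by_cases h : '/' ∈ cs
  · simp [h]
  · simp [h, afterSlash_no_slash cs h]

theorem path_name_alt_eq (s : String) : path_name_alt s = String.mk (afterSlash s.toList) := by
  unfold path_name_alt
  rw [show ("/" : String).toList = ['/'] from rfl, PySem.List.pyGet?_neg_one, splitOn_getLast? s.toList]

-- ===== VERDICT (by name: the statement is the Claim_ definition above) =====
theorem path_name_spec : Claim_equal_path_name := by
  intro s _
  unfold Spec_path_name
  rw [path_name_eq, path_name_alt_eq]
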